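-- pv_equiv track=rewrite | github.com/JJGO/geth | analysis/metrics.py | compute_synchs
-- ===== SOURCE A (Python) =====
-- def compute_synchs(changes, epochs, steps, init_val=1):
--     """
--     input:
--         changes     List[Tuple]
--             Sequence of changes in #steps between synchs,
--             applied at the beggining of the epochs
--             [(epoch_i, #steps between synchs)]
--         epochs      int
--             Number of epochs
--         steps       int
--             Number of steps per epoch
--         init_val    int
--             Default initial value for changes.
--             Overwritten if the first entry in changes is (0, _)
--     output:
--         synchs      int
--     """
--     assert epochs > 0, f"epochs={epochs} should be >0"
--     assert steps > 0, f"steps={steps} should be >0"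
--     assert init_val > 0, f"init_val={init_val} should be >0"
--
--     if len(changes) == 0:
--         d = steps * epochs
--         return d // init_val + (d % init_val > 0)
--
--     elif changes[0][0] != 0:
--         d, t = steps * changes[0][0], init_val
--         total = d // t + (d % t > 0)
--     else:
--         total = 0
--
--     epoch_diffs = [
--         steps * (changes[i][0] - changes[i - 1][0]) for i in range(1, len(changes))
--     ]
--     epoch_diffs.append(steps * (epochs - changes[-1][0]))
--     total += sum(
--         d // t + (d % t > 0) for d, t in zip(epoch_diffs, [x for _, x in changes])
--     )
--     return total
-- ===== SOURCE B (Python) =====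
-- def compute_synchs(changes, epochs, steps, init_val=1):
--     assert epochs > 0, f"epochs={epochs} should be >0"
--     assert steps > 0, f"steps={steps} should be >0"
--     assert init_val > 0, f"init_val={init_val} should be >0"
--
--     def solve(start, val, segs, end):
--         # synchs between epochs `start` and `end`, with interval `val` at
--         # `start` and the schedule changes `segs` applied in between
--         if not segs:
--             d = steps * (end - start)
--             return d // val + (d % val > 0)
--         m = len(segs) // 2
--         e, v = segs[m]
--         return solve(start, val, segs[:m], e) + solve(e, v, segs[m + 1:], end)
--
--     return solve(0, init_val, changes, epochs)
-- ===== Notes on version B (the rewrite author's own statement) =====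
-- stated objective: alternative
-- what changed: B replaces A's three-way branch plus index-built epoch_diffs list and zipped generator sum by a divide-and-conquer recursion: it splits the change list at its middle change and sums the synch counts of the two halves, carrying (start epoch, current interval) into each half; the empty-changes and zero-first-epoch special cases disappear (a zero-length leading span contributes 0).
import Mathlib
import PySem

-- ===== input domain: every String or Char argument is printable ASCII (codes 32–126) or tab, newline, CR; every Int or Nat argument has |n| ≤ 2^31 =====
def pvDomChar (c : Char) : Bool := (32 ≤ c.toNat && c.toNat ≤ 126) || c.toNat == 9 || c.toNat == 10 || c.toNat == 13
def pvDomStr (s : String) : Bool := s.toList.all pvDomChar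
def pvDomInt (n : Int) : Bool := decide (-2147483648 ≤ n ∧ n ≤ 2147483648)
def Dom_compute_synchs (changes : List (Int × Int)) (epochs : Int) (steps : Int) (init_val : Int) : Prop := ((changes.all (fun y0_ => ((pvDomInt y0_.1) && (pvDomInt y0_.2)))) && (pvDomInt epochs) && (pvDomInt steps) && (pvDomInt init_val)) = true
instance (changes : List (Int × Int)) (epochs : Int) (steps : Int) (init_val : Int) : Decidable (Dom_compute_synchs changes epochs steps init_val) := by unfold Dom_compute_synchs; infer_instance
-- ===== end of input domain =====

-- B counts synchs by divide-and-conquer on the change list instead of A's branch + diffs list + zipped sum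
-- (objective: alternative; same value on every input where A returns).


-- d // t + (d % t > 0): the literal arithmetic expression both Pythons contain
def pvCeil (d t : Int) : Int :=
  PySem.Int.floordiv d t + (if PySem.Int.mod d t > 0 then 1 else 0)

-- ===== PORT A =====
def compute_synchs (changes : List (Int × Int)) (epochs : Int) (steps : Int) (init_val : Int) : Int :=
  if changes.length = 0 then
    pvCeil (steps * epochs) init_val
  else
    let total0 : Int :=
      if (changes.headD (0, 0)).1 ≠ 0 then pvCeil (steps * (changes.headD (0, 0)).1) init_val
      else 0
    -- indices i ∈ range(1, len) and i-1 are always in range, so getD's default is never used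
    let epoch_diffs : List Int :=
      ((PySem.List.pyRange 1 (changes.length) 1).map (fun i =>
        steps * ((changes.getD i.toNat (0, 0)).1 - (changes.getD (i - 1).toNat (0, 0)).1)))
      ++ [steps * (epochs - (changes.getLastD (0, 0)).1)]
    total0 + ((epoch_diffs.zip (changes.map (fun x => x.2))).map (fun p => pvCeil p.1 p.2)).sum

-- ===== PORT B =====
-- Source B's `solve`: split the change list at its middle element, recurse on both halves
def pvSolve (steps : Int) (start val : Int) (segs : List (Int × Int)) (endE : Int) : Int :=
  if h : segs = [] then pvCeil (steps * (endE - start)) val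
  else
    pvSolve steps start val (segs.take (segs.length / 2))
        (segs[segs.length / 2]'(Nat.div_lt_self (List.length_pos_of_ne_nil h) (by norm_num))).1
      + pvSolve steps
          (segs[segs.length / 2]'(Nat.div_lt_self (List.length_pos_of_ne_nil h) (by norm_num))).1
          (segs[segs.length / 2]'(Nat.div_lt_self (List.length_pos_of_ne_nil h) (by norm_num))).2
          (segs.drop (segs.length / 2 + 1)) endE
termination_by segs.length
decreasing_by
  · have := List.length_pos_of_ne_nil h; simp [List.length_take]; omega
  · have := List.length_pos_of_ne_nil h; simp [List.length_drop]; omega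

def compute_synchs_alt (changes : List (Int × Int)) (epochs : Int) (steps : Int) (init_val : Int) : Int :=
  pvSolve steps 0 init_val changes epochs

-- ===== PRECONDITION & SPEC =====
-- Pre_ excludes exactly the inputs where A raises: a failed assert (epochs, steps or
-- init_val ≤ 0) or a ZeroDivisionError (a change whose interval value is 0).
def Pre_compute_synchs (changes : List (Int × Int)) (epochs : Int) (steps : Int) (init_val : Int) : Prop :=
  0 < epochs ∧ 0 < steps ∧ 0 < init_val ∧ ∀ p ∈ changes, p.2 ≠ 0
instance (changes : List (Int × Int)) (epochs : Int) (steps : Int) (init_val : Int) : Decidable (Pre_compute_synchs changes epochs steps init_val) := by unfold Pre_compute_synchs; infer_instance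

def pvWitness_compute_synchs : (List (Int × Int)) × Int × Int × Int := ([(2, 3), (5, 2)], 10, 4, 1)

def Spec_compute_synchs (changes : List (Int × Int)) (epochs : Int) (steps : Int) (init_val : Int) (out : Int) : Prop := out = compute_synchs_alt changes epochs steps init_val
instance (changes : List (Int × Int)) (epochs : Int) (steps : Int) (init_val : Int) (out : Int) : Decidable (Spec_compute_synchs changes epochs steps init_val out) := by unfold Spec_compute_synchs; infer_instance

-- ===== CLAIM (what is proved, stated in full; the proofs are below) =====
def Claim_equal_compute_synchs : Prop := ∀ (changes : List (Int × Int)) (epochs : Int) (steps : Int) (init_val : Int), Dom_compute_synchs changes epochs steps init_val → Pre_compute_synchs changes epochs steps init_val → Spec_compute_synchs changes epochs steps init_val (compute_synchs changes epochs steps init_val)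

-- ===== LEMMAS AND PROOFS =====

-- the linear left-to-right sum of the segment ceilings (proof-only reference function)
def pvSegSum (steps : Int) : Int → Int → List (Int × Int) → Int → Int
  | start, val, [], endE => pvCeil (steps * (endE - start)) val
  | start, val, (e, v) :: rest, endE =>
      pvCeil (steps * (e - start)) val + pvSegSum steps e v rest endE

theorem pvSegSum_append (steps : Int) :
    ∀ (l : List (Int × Int)) (start val e v : Int) (r : List (Int × Int)) (endE : Int),
      pvSegSum steps start val (l ++ (e, v) :: r) endE
        = pvSegSum steps start val l e + pvSegSum steps e v r endE
  | [], start, val, e, v, r, endE => by simp [pvSegSum]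
  | (a :: l), start, val, e, v, r, endE => by
      simp [pvSegSum, pvSegSum_append steps l, add_assoc]

theorem pvSolve_eq_segSum (steps : Int) :
    ∀ (n : Nat) (segs : List (Int × Int)), segs.length ≤ n →
      ∀ (start val endE : Int),
        pvSolve steps start val segs endE = pvSegSum steps start val segs endE := by
  intro n
  induction n with
  | zero =>
    intro segs hlen start val endE
    have h0 : segs = [] := List.length_eq_zero_iff.mp (Nat.le_zero.mp hlen)
    subst h0
    rw [pvSolve]
    simp [pvSegSum]
  | succ n ih =>
    intro segs hlen start val endE
    by_cases h : segs = []
    · subst h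
      rw [pvSolve]
      simp [pvSegSum]
    · rw [pvSolve, dif_neg h]
      have hpos : 0 < segs.length := List.length_pos_of_ne_nil h
      have hm : segs.length / 2 < segs.length := Nat.div_lt_self hpos (by norm_num)
      have hkey : segs = segs.take (segs.length / 2)
          ++ (segs[segs.length / 2].1, segs[segs.length / 2].2) :: segs.drop (segs.length / 2 + 1) := by
        conv_lhs => rw [← List.take_append_drop (segs.length / 2) segs]
        congr 1
        rw [List.drop_eq_getElem_cons hm]
      rw [ih _ (by simp [List.length_take]; omega),
          ih _ (by simp [List.length_drop]; omega)]
      conv_rhs => rw [hkey]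
      rw [pvSegSum_append]

-- each side of A's zipped sum, rewritten over the same zip (proved in the previous file's style)
theorem pv_epoch_diffs_eq (changes : List (Int × Int)) (epochs steps : Int) (h : changes ≠ []) :
    ((PySem.List.pyRange 1 (changes.length) 1).map (fun i =>
        steps * ((changes.getD i.toNat (0, 0)).1 - (changes.getD (i - 1).toNat (0, 0)).1)))
      ++ [steps * (epochs - (changes.getLastD (0, 0)).1)]
    = (changes.zip ((changes.drop 1).map (fun x => x.1) ++ [epochs])).map
        (fun p => steps * (p.2 - p.1.1)) := by
  have hn : 0 < changes.length := List.length_pos_of_ne_nil h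
  apply List.ext_getElem
  · simp [PySem.List.length_pyRange_one]; omega
  · intro k hk1 hk2
    have hlen1 : ((PySem.List.pyRange 1 (changes.length) 1).map (fun i =>
        steps * ((changes.getD i.toNat (0, 0)).1 - (changes.getD (i - 1).toNat (0, 0)).1))).length
        = changes.length - 1 := by
      simp [PySem.List.length_pyRange_one]
    have hk' : k < changes.length := by
      simp at hk2; omega
    by_cases hk : k < changes.length - 1
    · rw [List.getElem_append_left (by omega)]
      simp only [List.getElem_map, List.getElem_zip, PySem.List.getElem_pyRange_one]
      have h1 : (1 + (k : Int)).toNat = k + 1 := by omega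
      have h2 : (1 + (k : Int) - 1).toNat = k := by omega
      rw [h1, h2, List.getD_eq_getElem _ _ (by omega), List.getD_eq_getElem _ _ (by omega),
        List.getElem_append_left (by simpa using hk)]
      simp
    · have hkk : k = changes.length - 1 := by omega
      rw [List.getElem_append_right (by omega)]
      simp only [List.getElem_map, List.getElem_zip]
      rw [List.getElem_append_right (by simp; omega)]
      have hlast : changes.getLastD (0, 0) = changes[changes.length - 1] := by
        rw [List.getLastD_eq_getLast? , List.getLast?_eq_getElem?]
        simp [List.getElem?_eq_getElem (by omega : changes.length - 1 < changes.length)]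
      simp [hkk]
      left
      rw [← List.getLastD_eq_getLast?, hlast]

-- mapping over a list equals mapping the first projection over its zip with any long-enough list
theorem pv_map_eq_zip_map {α β γ : Type} (f : α → γ) :
    ∀ (l : List α) (w : List β), l.length ≤ w.length →
      l.map f = (l.zip w).map (fun p => f p.1)
  | [], _, _ => by simp
  | (a :: l), [], h => by simp at h
  | (a :: l), (b :: w), h => by
      simp [pv_map_eq_zip_map f l w (by simpa using h)]

-- the linear segment sum, written as A's zipped sum (head segment split off)
theorem pvSegSum_eq_zip_sum (steps : Int) :
    ∀ (rest : List (Int × Int)) (e v endE : Int),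
      pvSegSum steps e v rest endE
        = ((((e, v) :: rest).zip (rest.map (fun x => x.1) ++ [endE])).map
            (fun p => pvCeil (steps * (p.2 - p.1.1)) p.1.2)).sum
  | [], e, v, endE => by simp [pvSegSum]
  | ((e1, v1) :: rest), e, v, endE => by
      simp [pvSegSum, pvSegSum_eq_zip_sum steps rest e1 v1 endE]

theorem pvCeil_zero (t : Int) : pvCeil 0 t = 0 := by
  simp [pvCeil, PySem.Int.floordiv, PySem.Int.mod]

theorem compute_synchs_eq (changes : List (Int × Int)) (epochs steps init_val : Int) :
    compute_synchs changes epochs steps init_val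
      = compute_synchs_alt changes epochs steps init_val := by
  unfold compute_synchs_alt
  rw [pvSolve_eq_segSum steps changes.length changes le_rfl]
  by_cases h : changes.length = 0
  · have h0 : changes = [] := List.length_eq_zero_iff.mp h
    subst h0
    simp [compute_synchs, pvSegSum]
  · have hne : changes ≠ [] := by
      intro h0; exact h (by simp [h0])
    obtain ⟨⟨e0, v0⟩, rest, hc⟩ : ∃ a rest, changes = a :: rest := by
      cases changes with
      | nil => exact absurd rfl hne
      | cons a rest => exact ⟨a, rest, rfl⟩
    simp only [compute_synchs, if_neg h]
    rw [pv_epoch_diffs_eq changes epochs steps hne]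
    have hlen : changes.length ≤ ((changes.drop 1).map (fun x => x.1) ++ [epochs]).length := by
      simp; omega
    rw [pv_map_eq_zip_map (fun x => (x : Int × Int).2) changes _ hlen, List.zip_map']
    rw [hc]
    simp only [pvSegSum]
    rw [pvSegSum_eq_zip_sum]
    simp only [List.headD_cons, List.map_map, List.drop_succ_cons, List.drop_zero, sub_zero]
    congr 1
    by_cases he : e0 = 0
    · subst he
      simp [pvCeil_zero]
    · simp [he]

-- ===== VERDICT (by name: the statement is the Claim_ definition above) =====
theorem compute_synchs_spec : Claim_equal_compute_synchs := by
  intro changes epochs steps init_val _ _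
  exact compute_synchs_eq changes epochs steps init_val
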